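-- pv_equiv track=rewrite | github.com/gjtjdtn201/practice | 잡동사니/2.py | solution
-- ===== SOURCE A (Python) =====
-- def solution(encrypted_text, key, rotation):
--     answer = ''
--     word = {1: 'a', 2: 'b', 3: 'c', 4: 'd', 5: 'e', 6: 'f', 7: 'g', 8: 'h', 9: 'i', 10: 'j',
--             11: 'k', 12: 'l', 13: 'm', 14: 'n', 15: 'o', 16: 'p', 17: 'q', 18: 'r', 19: 's',
--             20: 't', 21: 'u', 22: 'v', 23: 'w', 24: 'x', 25: 'y', 26: 'z'}
--     num = {'a': 1, 'b': 2, 'c': 3, 'd': 4, 'e': 5, 'f': 6, 'g': 7, 'h': 8, 'i': 9, 'j': 10,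
--            'k': 11, 'l': 12, 'm': 13, 'n': 14, 'o': 15, 'p': 16, 'q': 17, 'r': 18, 's': 19,
--            't': 20, 'u': 21, 'v': 22, 'w': 23, 'x': 24, 'y': 25, 'z': 26}
--     temp = list(encrypted_text)
--     ttemp = ['' for _ in range(len(encrypted_text))]
--
--     # 문자를 반대로 돌립니다.
--     for w in range(len(temp)):
--         r = abs(rotation) % len(temp)
--         if rotation > 0:
--             n_i = w - r
--             if n_i < 0:
--                 n_i = len(temp) + n_i
--         else:
--             n_i = w + r
--             if n_i > len(temp) - 1:
--                 n_i = 0 + (n_i - len(temp))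
--         ttemp[n_i] = temp[w]
--     temp = [w for w in ttemp]
--
--     # key 값을 이용한 암호화를 해제합니다.
--     for w in range(len(temp)):
--         e_w = num[temp[w]]
--         k_w = num[key[w]]
--         r = e_w - k_w
--         if r < 1:
--             r = 26 + r
--         elif r > 26:
--             r = r - 26
--         temp[w] = word[r]
--     answer = ''.join(temp)
--     return answer
-- ===== SOURCE B (Python) =====
-- def solution(encrypted_text, key, rotation):
--     n = len(encrypted_text)
--     if n == 0:
--         rotated = encrypted_text
--     else:
--         r = abs(rotation) % n
--         if rotation > 0:
--             rotated = encrypted_text[r:] + encrypted_text[:r]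
--         else:
--             rotated = encrypted_text[n - r:] + encrypted_text[:n - r]
--     return ''.join(chr((ord(c) - ord(k) - 1) % 26 + 97)
--                    for c, k in zip(rotated, key))
-- ===== Notes on version B (the rewrite author's own statement) =====
-- stated objective: faster
-- what changed: B replaces A's per-character modular-index placement loop (building ttemp by assignments) with a single closed-form slice rotation, and replaces the two 26-entry lookup dicts and the branchy wrap-around adjustment with direct character arithmetic ((ord(c)-ord(k)-1) % 26 + 97) in one zip-map pass.
import Mathlib
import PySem

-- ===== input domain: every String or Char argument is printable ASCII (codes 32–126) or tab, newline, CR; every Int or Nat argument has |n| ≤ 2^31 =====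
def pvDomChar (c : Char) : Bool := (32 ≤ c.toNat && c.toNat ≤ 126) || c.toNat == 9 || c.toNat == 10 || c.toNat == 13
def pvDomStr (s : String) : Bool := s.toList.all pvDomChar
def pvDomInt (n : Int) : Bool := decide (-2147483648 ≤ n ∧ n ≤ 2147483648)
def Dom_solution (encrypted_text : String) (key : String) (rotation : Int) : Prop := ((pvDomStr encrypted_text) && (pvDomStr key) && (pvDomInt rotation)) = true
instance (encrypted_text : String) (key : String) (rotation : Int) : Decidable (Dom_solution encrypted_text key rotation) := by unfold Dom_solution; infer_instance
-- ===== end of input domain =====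

-- B replaces A's per-character modular-index rotation loop by a single closed-form
-- slice rotation and the two 26-entry dict lookups by direct character arithmetic
-- ((ord c - ord k - 1) mod 26 + 97): simpler, no tables, one zip-map pass.

-- ===== PORT A =====
def pvWordDict : PySem.Dict Int Char :=
  PySem.Dict.ofList [(1,'a'),(2,'b'),(3,'c'),(4,'d'),(5,'e'),(6,'f'),(7,'g'),(8,'h'),(9,'i'),(10,'j'),
    (11,'k'),(12,'l'),(13,'m'),(14,'n'),(15,'o'),(16,'p'),(17,'q'),(18,'r'),(19,'s'),
    (20,'t'),(21,'u'),(22,'v'),(23,'w'),(24,'x'),(25,'y'),(26,'z')]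

def pvNumDict : PySem.Dict Char Int :=
  PySem.Dict.ofList [('a',1),('b',2),('c',3),('d',4),('e',5),('f',6),('g',7),('h',8),('i',9),('j',10),
    ('k',11),('l',12),('m',13),('n',14),('o',15),('p',16),('q',17),('r',18),('s',19),
    ('t',20),('u',21),('v',22),('w',23),('x',24),('y',25),('z',26)]

-- Literal transliteration of A.  Python's list indexing/assignment is in range at every
-- access here, so plain getD/set are exact; the dict lookups num[...] / word[...] raise
-- KeyError outside lowercase input, which Pre_solution excludes (getD defaults are never
-- reached on Pre_).
def solution (encrypted_text : String) (key : String) (rotation : Int) : String :=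
  let temp := encrypted_text.toList
  let n := temp.length
  let ttemp := List.replicate n ' '
  let ttemp := (List.range n).foldl (fun l (w : Nat) =>
      let r : Int := PySem.Int.mod (rotation.natAbs : Int) (n : Int)
      let n_i : Int :=
        if rotation > 0 then
          let t := (Int.ofNat w) - r
          if t < 0 then (n : Int) + t else t
        else
          let t := (Int.ofNat w) + r
          if t > (n : Int) - 1 then 0 + (t - (n : Int)) else t
      l.set n_i.toNat (temp.getD w ' ')) ttemp
  let temp2 := ttemp
  let temp3 := (List.range n).foldl (fun l w =>
      let e_w := (pvNumDict.get? (l.getD w ' ')).getD 0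
      let k_w := (pvNumDict.get? (key.toList.getD w ' ')).getD 0
      let r := e_w - k_w
      let r := if r < 1 then 26 + r else if r > 26 then r - 26 else r
      l.set w ((pvWordDict.get? r).getD ' ')) temp2
  String.ofList temp3

-- ===== PORT B =====
-- Transliteration of B: closed-form slice rotation (drop/take = Python s[r:] + s[:r]
-- for 0 ≤ r ≤ len), then one zip-map with character arithmetic.
def solution_alt (encrypted_text : String) (key : String) (rotation : Int) : String :=
  let t := encrypted_text.toList
  let n := t.length
  let rotated :=
    if n = 0 then t
    else
      let r := rotation.natAbs % n
      if rotation > 0 then t.drop r ++ t.take r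
      else t.drop (n - r) ++ t.take (n - r)
  String.ofList ((rotated.zip key.toList).map (fun ck =>
    Char.ofNat ((PySem.Int.mod ((ck.1.toNat : Int) - (ck.2.toNat : Int) - 1) 26 + 97).toNat)))

-- ===== PRECONDITION & SPEC =====
-- Pre_solution is exactly where Python A returns: every character of the text and every
-- key character at a position < len(text) must be a lowercase letter (else num[...] is a
-- KeyError) and the key must be at least as long as the text (else key[w] is an IndexError).
def Pre_solution (encrypted_text : String) (key : String) (rotation : Int) : Prop :=
  encrypted_text.toList.length ≤ key.toList.length ∧
  encrypted_text.toList.all (fun c => 97 ≤ c.toNat && c.toNat ≤ 122) = true ∧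
  (key.toList.take encrypted_text.toList.length).all (fun c => 97 ≤ c.toNat && c.toNat ≤ 122) = true
instance (encrypted_text : String) (key : String) (rotation : Int) : Decidable (Pre_solution encrypted_text key rotation) := by unfold Pre_solution; infer_instance

def pvWitness_solution : String × String × Int := ("ab", "abc", -3)

def Spec_solution (encrypted_text : String) (key : String) (rotation : Int) (out : String) : Prop := out = solution_alt encrypted_text key rotation
instance (encrypted_text : String) (key : String) (rotation : Int) (out : String) : Decidable (Spec_solution encrypted_text key rotation out) := by unfold Spec_solution; infer_instance

-- ===== CLAIM (what is proved, stated in full; the proofs are below) =====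
def Claim_equal_solution : Prop := ∀ (encrypted_text : String) (key : String) (rotation : Int), Dom_solution encrypted_text key rotation → Pre_solution encrypted_text key rotation → Spec_solution encrypted_text key rotation (solution encrypted_text key rotation)

-- ===== LEMMAS AND PROOFS =====

-- any foldl whose step only `set`s preserves length
theorem pv_foldl_length {β : Type} (step : List Char → β → List Char)
    (hstep : ∀ l b, (step l b).length = l.length) :
    ∀ (ws : List β) (init : List Char), (ws.foldl step init).length = init.length := by
  intro ws
  induction ws with
  | nil => intro init; rfl
  | cons w ws ih => intro init; rw [List.foldl_cons, ih, hstep]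

-- writing temp[w] to position f w, f a bijection of [0,n): element i of the result
theorem pv_foldl_set_bij (temp init : List Char) (n : Nat) (f g : Nat → Nat)
    (hgf : ∀ w, w < n → g (f w) = w)
    (hfg : ∀ i, i < n → f (g i) = i) (hinit : init.length = n) :
    ∀ k, k ≤ n → ∀ i, i < n →
      ((List.range k).foldl (fun l w => l.set (f w) (temp.getD w ' ')) init).getD i ' '
        = if g i < k then temp.getD (g i) ' ' else init.getD i ' ' := by
  intro k
  induction k with
  | zero => intro _ i hi; simp
  | succ k ih =>
    intro hk i hi
    have hlen : ((List.range k).foldl (fun l w => l.set (f w) (temp.getD w ' ')) init).length = n := by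
      rw [pv_foldl_length _ (fun l b => List.length_set) _ init, hinit]
    rw [List.range_succ, List.foldl_append, List.foldl_cons, List.foldl_nil]
    rw [List.getD_eq_getElem _ _ (by rw [List.length_set, hlen]; exact hi)]
    rw [List.getElem_set]
    by_cases hik : f k = i
    · have hg : g i = k := by rw [← hik, hgf k (by omega)]
      rw [if_pos hik, if_pos (by omega : g i < k + 1), hg]
    · have hg : g i ≠ k := fun h => hik (by rw [← h, hfg i hi])
      rw [if_neg hik, ← List.getD_eq_getElem _ ' ' , ih (by omega) i hi]
      by_cases h : g i < k
      · rw [if_pos h, if_pos (by omega)]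
      · rw [if_neg h, if_neg (by omega)]

-- the in-place rewrite loop temp[w] = g(temp[w], w) is a map
theorem pv_foldl_set_map (g : Char → Nat → Char) {h : List Char → Nat → Char}
    (hh : ∀ l w, h l w = g (l.getD w ' ') w) (init : List Char) :
    ∀ k, k ≤ init.length → (List.range k).foldl (fun l w => l.set w (h l w)) init
      = ((List.range k).map (fun w => g (init.getD w ' ') w)) ++ init.drop k := by
  intro k
  induction k with
  | zero => intro _; simp
  | succ k ih =>
    intro hk
    rw [List.range_succ, List.foldl_append, List.foldl_cons, List.foldl_nil, ih (by omega), hh]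
    have hmlen : ((List.range k).map (fun w => g (init.getD w ' ') w)).length = k := by simp
    have hkl : k < init.length := by omega
    have hgetD : (((List.range k).map (fun w => g (init.getD w ' ') w)) ++ init.drop k).getD k ' '
        = init.getD k ' ' := by
      rw [List.getD_eq_getElem _ _ (by simp; omega), List.getElem_append_right (by omega)]
      simp only [hmlen, Nat.sub_self, List.getElem_drop, Nat.add_zero]
      rw [List.getD_eq_getElem _ _ hkl]
    rw [hgetD, List.set_append_right _ _ (by omega), hmlen, Nat.sub_self]
    rw [List.drop_eq_getElem_cons hkl, List.set_cons_zero]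
    rw [List.map_append, List.map_cons, List.map_nil, List.append_assoc]
    rw [List.getD_eq_getElem _ _ hkl]
    rfl

-- full decrypt loop: rewrite-in-place over the whole list is a map over range
theorem pv_dec_loop (g : Char → Nat → Char) {h : List Char → Nat → Char}
    (hh : ∀ l w, h l w = g (l.getD w ' ') w) (init : List Char) (n : Nat)
    (hlen : init.length = n) :
    (List.range n).foldl (fun l w => l.set w (h l w)) init
      = (List.range n).map (fun w => g (init.getD w ' ') w) := by
  rw [pv_foldl_set_map g hh init n (by omega)]
  have hd : List.drop n init = [] := by rw [← hlen]; exact List.drop_length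
  rw [hd, List.append_nil]

theorem pv_num_get_aux : ∀ m ∈ List.range 26,
    pvNumDict.get? (Char.ofNat (97 + m)) = some (((97 + m : Nat) : Int) - 96) := by decide

theorem pv_num_get (c : Char) (h1 : 97 ≤ c.toNat) (h2 : c.toNat ≤ 122) :
    pvNumDict.get? c = some ((c.toNat : Int) - 96) := by
  have hm := pv_num_get_aux (c.toNat - 97) (List.mem_range.mpr (by omega))
  rw [(by omega : 97 + (c.toNat - 97) = c.toNat), Char.ofNat_toNat] at hm
  rw [hm]

theorem pv_word_get_aux : ∀ m ∈ List.range 26,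
    pvWordDict.get? ((m : Nat) + 1 : Int) = some (Char.ofNat (97 + m)) := by decide

theorem pv_word_get (r : Int) (h1 : 1 ≤ r) (h2 : r ≤ 26) :
    pvWordDict.get? r = some (Char.ofNat (96 + r.toNat)) := by
  have hm := pv_word_get_aux (r - 1).toNat (List.mem_range.mpr (by omega))
  rw [(by omega : (((r - 1).toNat : Nat) : Int) + 1 = r),
      (by omega : 97 + (r - 1).toNat = 96 + r.toNat)] at hm
  exact hm

-- pointwise: A's dict decryption = B's character arithmetic, on lowercase letters
theorem pv_dec_eq (c k : Char) (hc1 : 97 ≤ c.toNat) (hc2 : c.toNat ≤ 122)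
    (hk1 : 97 ≤ k.toNat) (hk2 : k.toNat ≤ 122) :
    ((pvWordDict.get?
        (let r := (pvNumDict.get? c).getD 0 - (pvNumDict.get? k).getD 0
         if r < 1 then 26 + r else if r > 26 then r - 26 else r)).getD ' ')
      = Char.ofNat ((PySem.Int.mod ((c.toNat : Int) - (k.toNat : Int) - 1) 26 + 97).toNat) := by
  rw [pv_num_get c hc1 hc2, pv_num_get k hk1 hk2]
  rw [PySem.Int.mod_eq_emod_of_pos (by norm_num)]
  simp only [Option.getD_some]
  split_ifs with h1 h2
  · rw [pv_word_get _ (by omega) (by omega), Option.getD_some]; congr 1; omega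
  · omega
  · rw [pv_word_get _ (by omega) (by omega), Option.getD_some]; congr 1; omega

-- modular-shift arithmetic used to read off the rotation loop
theorem pv_gf (n s w : Nat) (hs : s ≤ n) (hw : w < n) :
    ((w + s) % n + (n - s) % n) % n = w := by
  rw [Nat.add_mod_mod, Nat.mod_add_mod, (by omega : w + s + (n - s) = w + n),
      Nat.add_mod_right, Nat.mod_eq_of_lt hw]

theorem pv_fg (n s i : Nat) (hs : s ≤ n) (hi : i < n) :
    ((i + (n - s) % n) % n + s) % n = i := by
  rw [Nat.mod_add_mod, Nat.add_right_comm, Nat.add_mod_mod,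
      (by omega : i + s + (n - s) = i + n), Nat.add_mod_right, Nat.mod_eq_of_lt hi]

theorem pv_shift_pos (n r w : Nat) (hr : r < n) (hw : w < n) :
    (w + (n - r) % n) % n = if w < r then n + w - r else w - r := by
  by_cases hr0 : r = 0
  · subst hr0
    rw [Nat.sub_zero, Nat.mod_self, Nat.add_zero, Nat.mod_eq_of_lt hw, if_neg (by omega)]
    omega
  · rw [Nat.mod_eq_of_lt (by omega : n - r < n)]
    by_cases hwr : w < r
    · rw [if_pos hwr, Nat.mod_eq_of_lt (by omega)]; omega
    · rw [if_neg hwr, (by omega : w + (n - r) = (w - r) + n), Nat.add_mod_right,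
          Nat.mod_eq_of_lt (by omega)]

theorem pv_shift_neg (n r w : Nat) (hr : r < n) (hw : w < n) :
    (w + r) % n = if n - 1 < w + r then w + r - n else w + r := by
  by_cases h : n - 1 < w + r
  · rw [if_pos h]
    conv_lhs => rw [(by omega : w + r = (w + r - n) + n)]
    rw [Nat.add_mod_right, Nat.mod_eq_of_lt (by omega)]
  · rw [if_neg h, Nat.mod_eq_of_lt (by omega)]

-- the whole rotation loop is List.rotate
theorem pv_rotate_loop (t init : List Char) (n s : Nat) {fI : Nat → Nat}
    (ht : t.length = n) (hs : s < n)
    (hfi : ∀ w, w < n → fI w = (w + s) % n) (hinit : init.length = n) :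
    (List.range n).foldl (fun l w => l.set (fI w) (t.getD w ' ')) init
      = t.rotate ((n - s) % n) := by
  have hn : 0 < n := by omega
  have hcong : (List.range n).foldl (fun l w => l.set (fI w) (t.getD w ' ')) init
      = (List.range n).foldl (fun l w => l.set ((w + s) % n) (t.getD w ' ')) init := by
    apply PySem.List.foldl_congr_mem
    intro acc w hw
    rw [hfi w (List.mem_range.mp hw)]
  rw [hcong]
  apply List.ext_getElem
  · rw [pv_foldl_length _ (fun l b => List.length_set), hinit, List.length_rotate, ht]
  · intro i h1 h2
    have hi : i < n := by
      rw [pv_foldl_length _ (fun l b => List.length_set), hinit] at h1; exact h1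
    rw [← List.getD_eq_getElem _ ' ', ← List.getD_eq_getElem _ ' ']
    rw [pv_foldl_set_bij t init n (fun w => (w + s) % n) (fun i => (i + (n - s) % n) % n)
          (fun w hw => pv_gf n s w (by omega) hw)
          (fun i hi => pv_fg n s i (by omega) hi) hinit n le_rfl i hi]
    rw [if_pos (Nat.mod_lt _ hn)]
    rw [List.getD_eq_getElem _ _ (by rw [ht]; exact Nat.mod_lt _ hn),
        List.getD_eq_getElem _ _ (by rw [List.length_rotate, ht]; omega)]
    rw [List.getElem_rotate]
    congr 1
    rw [ht]

-- ===== VERDICT (by name: the statement is the Claim_ definition above) =====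
theorem solution_spec : Claim_equal_solution := by
  intro text key rot _ hpre
  obtain ⟨hklen, htext, hkey⟩ := hpre
  simp only [List.all_eq_true, Bool.and_eq_true, decide_eq_true_eq] at htext hkey
  unfold Spec_solution
  simp only [solution, solution_alt]
  by_cases hn0 : text.toList.length = 0
  · rw [List.length_eq_zero_iff.mp hn0]
    simp
  · have hn : 0 < text.toList.length := Nat.pos_of_ne_zero hn0
    set t := text.toList with ht
    set n := t.length with hndef
    set r := rot.natAbs % n with hrdef
    have hr : r < n := Nat.mod_lt _ hn
    set s := (if rot > 0 then (n - r) % n else r : Nat) with hsdef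
    have hs : s < n := by
      rw [hsdef]; split_ifs
      · exact Nat.mod_lt _ hn
      · exact hr
    have hR : PySem.Int.mod (rot.natAbs : Int) (n : Int) = (r : Int) := by
      rw [PySem.Int.mod_eq_emod_of_pos (by exact_mod_cast hn), hrdef]
      exact (Int.natCast_mod _ _).symm
    have hfi : ∀ w, w < n →
        (if rot > 0 then
            if Int.ofNat w - PySem.Int.mod (rot.natAbs : Int) (n : Int) < 0 then
              (n : Int) + (Int.ofNat w - PySem.Int.mod (rot.natAbs : Int) (n : Int))
            else Int.ofNat w - PySem.Int.mod (rot.natAbs : Int) (n : Int)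
          else
            if Int.ofNat w + PySem.Int.mod (rot.natAbs : Int) (n : Int) > (n : Int) - 1 then
              0 + (Int.ofNat w + PySem.Int.mod (rot.natAbs : Int) (n : Int) - (n : Int))
            else Int.ofNat w + PySem.Int.mod (rot.natAbs : Int) (n : Int)).toNat
          = (w + s) % n := by
      intro w hw
      rw [hR]
      by_cases hpos : rot > 0
      · rw [if_pos hpos]
        have hsp : s = (n - r) % n := by rw [hsdef, if_pos hpos]
        rw [hsp, pv_shift_pos n r w hr hw]
        simp only [Int.ofNat_eq_natCast]
        split_ifs <;> omega
      · rw [if_neg hpos]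
        have hsp : s = r := by rw [hsdef, if_neg hpos]
        rw [hsp, pv_shift_neg n r w hr hw]
        simp only [Int.ofNat_eq_natCast]
        split_ifs <;> omega
    rw [pv_rotate_loop t (List.replicate n ' ') n s hndef.symm hs hfi (List.length_replicate)]
    rw [pv_dec_loop
        (fun c w => ((pvWordDict.get?
          (if (pvNumDict.get? c).getD 0 - (pvNumDict.get? (key.toList.getD w ' ')).getD 0 < 1 then
            26 + ((pvNumDict.get? c).getD 0 - (pvNumDict.get? (key.toList.getD w ' ')).getD 0)
          else
            if (pvNumDict.get? c).getD 0 - (pvNumDict.get? (key.toList.getD w ' ')).getD 0 > 26 then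
              (pvNumDict.get? c).getD 0 - (pvNumDict.get? (key.toList.getD w ' ')).getD 0 - 26
            else (pvNumDict.get? c).getD 0 - (pvNumDict.get? (key.toList.getD w ' ')).getD 0)).getD ' '))
        (fun l w => rfl) (t.rotate ((n - s) % n)) n
        (by rw [List.length_rotate])]
    have hrotB : (if n = 0 then t
        else
          if rot > 0 then List.drop r t ++ List.take r t
          else List.drop (n - r) t ++ List.take (n - r) t) = t.rotate ((n - s) % n) := by
      rw [if_neg hn0]
      by_cases hpos : rot > 0
      · rw [if_pos hpos]
        have hsp : s = (n - r) % n := by rw [hsdef, if_pos hpos]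
        have hρ : (n - s) % n = r := by
          rw [hsp]
          by_cases hr0 : r = 0
          · rw [hr0, Nat.sub_zero, Nat.mod_self, Nat.sub_zero, Nat.mod_self]
          · rw [Nat.mod_eq_of_lt (by omega : n - r < n), (by omega : n - (n - r) = r),
                Nat.mod_eq_of_lt hr]
        rw [hρ]
        exact (List.rotate_eq_drop_append_take (by omega : r ≤ t.length)).symm
      · rw [if_neg hpos]
        have hsp : s = r := by rw [hsdef, if_neg hpos]
        rw [hsp]
        by_cases hr0 : r = 0
        · rw [hr0, Nat.sub_zero, Nat.mod_self, List.rotate_zero, hndef,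
              List.drop_length, List.take_length, List.nil_append]
        · rw [Nat.mod_eq_of_lt (by omega : n - r < n)]
          exact (List.rotate_eq_drop_append_take (by omega : n - r ≤ t.length)).symm
    rw [hrotB]
    congr 1
    apply List.ext_getElem
    · simp only [List.length_map, List.length_range, List.length_zip, List.length_rotate]
      omega
    · intro i h1 h2
      have hi : i < n := by simpa using h1
      simp only [List.getElem_map, List.getElem_range, List.getElem_zip]
      rw [List.getD_eq_getElem _ _ (by rw [List.length_rotate]; omega)]
      rw [List.getD_eq_getElem key.toList ' ' (by omega : i < key.toList.length)]
      have hc : (t.rotate ((n - s) % n))[i]'(by rw [List.length_rotate]; omega) ∈ t :=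
        (List.rotate_perm t ((n - s) % n)).subset (List.getElem_mem _)
      have hkc : key.toList[i]'(by omega) ∈ List.take n key.toList := by
        have hg : (List.take n key.toList)[i]'(by rw [List.length_take]; omega)
            = key.toList[i]'(by omega) := List.getElem_take
        rw [← hg]
        exact List.getElem_mem _
      obtain ⟨hc1, hc2⟩ := htext _ hc
      obtain ⟨hk1, hk2⟩ := hkey _ hkc
      exact pv_dec_eq _ _ hc1 hc2 hk1 hk2
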